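-- pv_equiv track=rewrite | github.com/t-troebst/AOC2021 | day24/day24.py | max_accept
-- ===== SOURCE A (Python) =====
-- def max_accept(program, z=0):
--     if not program:
--         return () if z == 0 else None
--
--     type1, c0, c1 = program[0]
--
--     if not type1:
--         w = z % 26 + c0
--
--         if w not in range(1, 10):
--             return None
--
--         r = max_accept(program[1:], z // 26)
--         return (w,) + r if r is not None else None
--
--     for w in range(9, 0, -1):
--         r = max_accept(program[1:], z * 26 + w + c1)
--
--         if r is not None:
--             return (w,) + r
-- ===== SOURCE B (Python) =====
-- from functools import reduce
--
-- def max_accept(program, z=0):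
--     # Compile the program right-to-left into a chain of continuations:
--     # each instruction becomes a closure calling the continuation for the
--     # rest of the program (built once; no per-node list slicing).
--     def compile_step(rest, instr):
--         type1, c0, c1 = instr
--         if not type1:
--             def step(z):
--                 w = z % 26 + c0
--                 if 1 <= w <= 9:
--                     r = rest(z // 26)
--                     if r is not None:
--                         return (w,) + r
--                 return None
--         else:
--             def step(z):
--                 for w in range(9, 0, -1):
--                     r = rest(z * 26 + w + c1)
--                     if r is not None:
--                         return (w,) + r
--                 return None
--         return step
--
--     base = lambda zz: () if zz == 0 else None
--     return reduce(compile_step, reversed(program), base)(z)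
-- ===== Notes on version B (the rewrite author's own statement) =====
-- stated objective: alternative
-- what changed: B right-folds the program into a chain of continuation closures built once and then runs the search by calling that chain, instead of A's direct recursion that copies program[1:] at every search node.
import Mathlib
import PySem

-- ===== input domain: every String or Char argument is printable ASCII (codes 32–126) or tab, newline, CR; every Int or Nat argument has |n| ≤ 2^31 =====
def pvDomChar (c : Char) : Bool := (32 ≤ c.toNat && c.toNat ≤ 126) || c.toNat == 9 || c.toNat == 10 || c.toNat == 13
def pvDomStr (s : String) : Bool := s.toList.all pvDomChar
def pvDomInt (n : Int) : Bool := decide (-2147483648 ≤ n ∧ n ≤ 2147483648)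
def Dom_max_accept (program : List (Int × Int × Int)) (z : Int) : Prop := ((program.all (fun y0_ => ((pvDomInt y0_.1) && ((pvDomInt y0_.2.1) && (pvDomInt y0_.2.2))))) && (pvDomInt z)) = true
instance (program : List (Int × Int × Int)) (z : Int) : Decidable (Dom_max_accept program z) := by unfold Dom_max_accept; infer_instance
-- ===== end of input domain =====

-- B compiles the program right-to-left (a fold) into a chain of continuations queried once,
-- instead of A's recursion that re-slices the program at every search node; return value proven equal.

-- ===== PORT A =====
-- loop 'for w in range(9,0,-1): ...' of A; f w is the recursive call on program[1:]
def pvLoopA (f : Int → Option (List Int)) : List Int → Option (List Int)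
  | [] => none
  | w :: ws =>
    match f w with
    | some r => some (w :: r)
    | none => pvLoopA f ws

def max_accept (program : List (Int × Int × Int)) (z : Int) : Option (List Int) :=
  match program with
  | [] => if z = 0 then some [] else none
  | (type1, c0, c1) :: rest =>
    if type1 = 0 then
      let w := PySem.Int.mod z 26 + c0
      if 1 ≤ w ∧ w < 10 then
        match max_accept rest (PySem.Int.floordiv z 26) with
        | some r => some (w :: r)
        | none => none
      else none
    else
      pvLoopA (fun w => max_accept rest (z * 26 + w + c1)) (PySem.List.pyRange 9 0 (-1))
termination_by program.length
decreasing_by all_goals simp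

-- ===== PORT B =====
-- the 'for w in range(9,0,-1)' loop inside a compiled type-1 step of B
def pvTryB (rest : Int → Option (List Int)) : List Int → Option (List Int)
  | [] => none
  | w :: ws =>
    match rest w with
    | some r => some (w :: r)
    | none => pvTryB rest ws

-- compile_step of B: one instruction becomes a closure over the continuation 'rest'
def pvCompileStep (rest : Int → Option (List Int)) (instr : Int × Int × Int) :
    Int → Option (List Int) :=
  match instr with
  | (type1, c0, c1) =>
    if type1 = 0 then
      fun z =>
        let w := PySem.Int.mod z 26 + c0
        if 1 ≤ w ∧ w ≤ 9 then
          match rest (PySem.Int.floordiv z 26) with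
          | some r => some (w :: r)
          | none => none
        else none
    else
      fun z => pvTryB (fun w => rest (z * 26 + w + c1)) (PySem.List.pyRange 9 0 (-1))

-- base = lambda zz: () if zz == 0 else None
def pvBase (zz : Int) : Option (List Int) :=
  if zz = 0 then some [] else none

def max_accept_alt (program : List (Int × Int × Int)) (z : Int) : Option (List Int) :=
  (program.reverse.foldl pvCompileStep pvBase) z

-- ===== PRECONDITION & SPEC =====
def Spec_max_accept (program : List (Int × Int × Int)) (z : Int) (out : Option (List Int)) : Prop := out = max_accept_alt program z
instance (program : List (Int × Int × Int)) (z : Int) (out : Option (List Int)) : Decidable (Spec_max_accept program z out) := by unfold Spec_max_accept; infer_instance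

-- ===== CLAIM (what is proved, stated in full; the proofs are below) =====
def Claim_equal_max_accept : Prop := ∀ (program : List (Int × Int × Int)) (z : Int), Dom_max_accept program z → Spec_max_accept program z (max_accept program z)

-- ===== LEMMAS AND PROOFS =====

-- A's digit loop and B's compiled digit loop agree for pointwise-equal continuations
lemma pvTryB_eq_pvLoopA (f g : Int → Option (List Int)) (h : ∀ x, g x = f x) :
    ∀ ws, pvTryB g ws = pvLoopA f ws := by
  intro ws
  induction ws with
  | nil => rfl
  | cons w ws ih =>
    simp only [pvTryB, pvLoopA, h w]
    cases f w with
    | some r => rfl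
    | none => exact ih

-- folding B's compiler over the reversed program yields A's recursive search
lemma pvFold_eq_max_accept :
    ∀ (program : List (Int × Int × Int)) (z : Int),
      (program.reverse.foldl pvCompileStep pvBase) z = max_accept program z := by
  intro program
  induction program with
  | nil => intro z; simp [pvBase, max_accept]
  | cons instr rest ih =>
    intro z
    obtain ⟨type1, c0, c1⟩ := instr
    have hfold : ((type1, c0, c1) :: rest).reverse.foldl pvCompileStep pvBase
        = pvCompileStep (rest.reverse.foldl pvCompileStep pvBase) (type1, c0, c1) := by
      rw [List.reverse_cons, List.foldl_append]
      rfl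
    rw [hfold]
    by_cases ht : type1 = 0
    · simp only [pvCompileStep, if_pos ht, max_accept, ih]
      have : (1 ≤ PySem.Int.mod z 26 + c0 ∧ PySem.Int.mod z 26 + c0 ≤ 9)
          ↔ (1 ≤ PySem.Int.mod z 26 + c0 ∧ PySem.Int.mod z 26 + c0 < 10) := by omega
      rw [if_congr this rfl rfl]
    · simp only [pvCompileStep, if_neg ht, max_accept]
      exact pvTryB_eq_pvLoopA (fun w => max_accept rest (z * 26 + w + c1))
        (fun w => rest.reverse.foldl pvCompileStep pvBase (z * 26 + w + c1))
        (fun x => ih (z * 26 + x + c1)) _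

-- ===== VERDICT (by name: the statement is the Claim_ definition above) =====
theorem max_accept_spec : Claim_equal_max_accept := by
  intro program z _
  unfold Spec_max_accept max_accept_alt
  exact (pvFold_eq_max_accept program z).symm
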